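-- pv_equiv track=rewrite | github.com/HBcao233/mtgbot-plugins | plugins/163music/settmusic.py | bTv6p
-- ===== SOURCE A (Python) =====
-- def ET7M(hu3x):
--   if hu3x < -128:
--     return ET7M(128 - (-128 - hu3x))
--   elif -128 <= hu3x <= 127:
--     return hu3x
--   elif hu3x > 127:
--     return ET7M(-129 + hu3x - 127)
--   else:
--     raise ValueError('1001')
--
-- def bTv6p(bbs3x):
--   if bbs3x is None or len(bbs3x) == 0:
--     return bbs3x
--   sy5D = []
--   for i in range(0, len(bbs3x), 2):
--     pP5U = int(bbs3x[i], 16) << 4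
--     pO5T = int(bbs3x[i + 1], 16)
--     sy5D.append(ET7M(pP5U + pO5T))
--   return sy5D
-- ===== SOURCE B (Python) =====
-- def bTv6p(bbs3x):
--   if bbs3x is None or len(bbs3x) == 0:
--     return bbs3x
--   def go(s):
--     if not s:
--       return []
--     v = (int(s[0], 16) << 4) + int(s[1], 16)
--     return [v - 256 if v > 127 else v] + go(s[2:])
--   return go(bbs3x)
-- ===== Notes on version B (the rewrite author's own statement) =====
-- stated objective: simpler
-- what changed: Replaced the index loop over range(0,len,2) with direct structural recursion consuming the string two characters at a time, and replaced the recursive wrap-around helper ET7M by the closed-form signed-byte conversion v-256 if v>127 else v.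
-- outside the precondition, e.g. on bTv6p(''): A returns '', B returns ''
import Mathlib
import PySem

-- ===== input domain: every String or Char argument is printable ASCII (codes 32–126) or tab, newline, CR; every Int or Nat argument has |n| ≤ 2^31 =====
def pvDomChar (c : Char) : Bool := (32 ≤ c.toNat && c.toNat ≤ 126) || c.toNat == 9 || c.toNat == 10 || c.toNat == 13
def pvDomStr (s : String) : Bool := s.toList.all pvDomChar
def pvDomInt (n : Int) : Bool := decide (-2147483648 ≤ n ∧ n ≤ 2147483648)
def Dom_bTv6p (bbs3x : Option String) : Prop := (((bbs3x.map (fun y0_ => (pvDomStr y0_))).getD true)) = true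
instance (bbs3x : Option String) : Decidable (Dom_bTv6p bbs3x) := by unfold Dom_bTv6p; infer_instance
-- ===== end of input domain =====

-- B replaces the index loop and the recursive wrap-around helper ET7M by direct
-- two-characters-at-a-time recursion with the closed-form signed-byte conversion (objective: simpler).

-- ===== PORT A =====

-- int(c, 16) for a single printable-ASCII character: exact (digits, a-f, A-F; anything else raises ValueError = none)
def hexVal? (c : Char) : Option Int :=
  if 48 ≤ c.toNat ∧ c.toNat ≤ 57 then some ((c.toNat : Int) - 48)
  else if 97 ≤ c.toNat ∧ c.toNat ≤ 102 then some ((c.toNat : Int) - 87)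
  else if 65 ≤ c.toNat ∧ c.toNat ≤ 70 then some ((c.toNat : Int) - 55)
  else none

def ET7M (hu3x : Int) : Int :=
  if _h1 : hu3x < -128 then ET7M (128 - (-128 - hu3x))
  else if -128 ≤ hu3x ∧ hu3x ≤ 127 then hu3x
  else if _h3 : 127 < hu3x then ET7M (-129 + hu3x - 127)
  else hu3x   -- Python's 'raise ValueError' branch: unreachable, Int trichotomy covers all cases
termination_by 2 * hu3x.natAbs + (if 127 < hu3x then 1 else 0)
decreasing_by all_goals (split_ifs <;> omega)

-- x << 4 on the nonnegative value int(c,16) is x * 16 (exact)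
def bTv6p (bbs3x : Option String) : Option (List Int) :=
  match bbs3x with
  | none => none
  | some s =>
    let cs := s.toList
    if cs.length = 0 then none   -- Python returns the empty *string* here, not a list of ints: excluded by Pre_
    else
      (PySem.List.pyRange 0 (cs.length : Int) 2).foldl
        (fun acc i =>
          acc.bind fun sy5D =>
            (PySem.List.pyGet? cs i).bind fun cH =>
              (hexVal? cH).bind fun pP5U =>
                (PySem.List.pyGet? cs (i + 1)).bind fun cL =>
                  (hexVal? cL).bind fun pO5T =>
                    some (sy5D ++ [ET7M (pP5U * 16 + pO5T)]))
        (some [])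

-- ===== PORT B =====

def bTv6pGo : List Char → Option (List Int)
  | [] => some []
  | c1 :: c2 :: rest =>
      (hexVal? c1).bind fun hi =>
        (hexVal? c2).bind fun lo =>
          (bTv6pGo rest).map fun t =>
            (if 127 < hi * 16 + lo then hi * 16 + lo - 256 else hi * 16 + lo) :: t
  | [_] => none   -- s[1] raises IndexError in Python

def bTv6p_alt (bbs3x : Option String) : Option (List Int) :=
  match bbs3x with
  | none => none
  | some s =>
    let cs := s.toList
    if cs.length = 0 then none   -- same empty-string early return as A: excluded by Pre_
    else bTv6pGo cs

-- ===== PRECONDITION & SPEC =====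

-- Pre_ excludes: the empty string (A returns the empty *string*, not a value of Option (List Int));
-- odd-length strings (A raises IndexError); strings with a non-hex-digit character (A raises ValueError).
def Pre_bTv6p (bbs3x : Option String) : Prop :=
  (bbs3x.all fun s =>
    decide (s.toList.length ≠ 0) && decide (s.toList.length % 2 = 0) &&
    s.toList.all fun c =>
      decide ((48 ≤ c.toNat ∧ c.toNat ≤ 57) ∨ (97 ≤ c.toNat ∧ c.toNat ≤ 102) ∨
              (65 ≤ c.toNat ∧ c.toNat ≤ 70))) = true

instance (bbs3x : Option String) : Decidable (Pre_bTv6p bbs3x) := by unfold Pre_bTv6p; infer_instance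

def pvWitness_bTv6p : Option String := some "ff007f80"

def Spec_bTv6p (bbs3x : Option String) (out : Option (List Int)) : Prop := out = bTv6p_alt bbs3x
instance (bbs3x : Option String) (out : Option (List Int)) : Decidable (Spec_bTv6p bbs3x out) := by unfold Spec_bTv6p; infer_instance

-- ===== CLAIM (what is proved, stated in full; the proofs are below) =====
def Claim_equal_bTv6p : Prop := ∀ (bbs3x : Option String), Dom_bTv6p bbs3x → Pre_bTv6p bbs3x → Spec_bTv6p bbs3x (bTv6p bbs3x)

-- ===== LEMMAS AND PROOFS =====

-- the shared hex-digit condition, as a Prop on one character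
def IsHex (c : Char) : Prop :=
  (48 ≤ c.toNat ∧ c.toNat ≤ 57) ∨ (97 ≤ c.toNat ∧ c.toNat ≤ 102) ∨ (65 ≤ c.toNat ∧ c.toNat ≤ 70)

-- total hex value and signed-byte conversion (proof-side spec helpers)
def hx (c : Char) : Int := (hexVal? c).getD 0
def sbyte (v : Int) : Int := if 127 < v then v - 256 else v

def decode : List Char → List Int
  | [] => []
  | [_] => []
  | c1 :: c2 :: rest => sbyte (hx c1 * 16 + hx c2) :: decode rest

theorem hexVal?_of_isHex {c : Char} (h : IsHex c) :
    hexVal? c = some (hx c) ∧ 0 ≤ hx c ∧ hx c ≤ 15 := by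
  rcases h with h | h | h <;> unfold hx hexVal? <;> split_ifs <;>
    simp only [Option.getD_some] <;> exact ⟨trivial, by omega, by omega⟩

theorem ET7M_eq_sbyte {v : Int} (h0 : 0 ≤ v) (h1 : v ≤ 255) : ET7M v = sbyte v := by
  rw [ET7M]
  split_ifs with ha hb hc
  · omega
  · unfold sbyte; split_ifs <;> omega
  · rw [ET7M]; unfold sbyte; split_ifs <;> omega
  · omega

theorem decode_append {l₁ l₂ : List Char} (h : l₁.length % 2 = 0) :
    decode (l₁ ++ l₂) = decode l₁ ++ decode l₂ := by
  induction l₁ using decode.induct with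
  | case1 => simp [decode]
  | case2 c => simp at h
  | case3 c1 c2 rest ih =>
      simp only [List.cons_append, decode]
      rw [ih (by simp only [List.length_cons] at h; omega)]

theorem bTv6pGo_eq_decode {cs : List Char} (hhex : ∀ c ∈ cs, IsHex c)
    (hev : cs.length % 2 = 0) : bTv6pGo cs = some (decode cs) := by
  induction cs using bTv6pGo.induct with
  | case1 => simp [bTv6pGo, decode]
  | case2 c1 c2 rest ih =>
      obtain ⟨h1, _, _⟩ := hexVal?_of_isHex (hhex c1 (by simp))
      obtain ⟨h2, _, _⟩ := hexVal?_of_isHex (hhex c2 (by simp))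
      simp only [bTv6pGo, h1, h2, Option.bind_some]
      rw [ih (fun c hc => hhex c (by simp [hc])) (by simp only [List.length_cons] at hev; omega)]
      simp only [Option.map_some, decode, sbyte]
  | case3 c => simp at hev

theorem pyRange_two (m : Nat) :
    PySem.List.pyRange 0 (2 * (m : Int)) 2
      = (List.range m).map (fun k : Nat => (0 : Int) + 2 * (k : Int)) := by
  rw [PySem.List.pyRange_of_pos _ _ (by norm_num)]
  have hc : (if (0 : Int) < 2 * (m : Int) then ((2 * (m : Int) - 0 + 2 - 1) / 2).toNat else 0) = m := by
    split_ifs with h <;> omega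
  rw [hc]

theorem A_fold {cs : List Char} (hhex : ∀ c ∈ cs, IsHex c) :
    ∀ m : Nat, 2 * m ≤ cs.length →
      ((List.range m).map (fun k : Nat => (0 : Int) + 2 * (k : Int))).foldl
        (fun acc i =>
          acc.bind fun sy5D =>
            (PySem.List.pyGet? cs i).bind fun cH =>
              (hexVal? cH).bind fun pP5U =>
                (PySem.List.pyGet? cs (i + 1)).bind fun cL =>
                  (hexVal? cL).bind fun pO5T =>
                    some (sy5D ++ [ET7M (pP5U * 16 + pO5T)]))
        (some []) = some (decode (cs.take (2 * m))) := by
  intro m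
  induction m with
  | zero => intro _; simp [decode]
  | succ m ih =>
      intro hm
      rw [List.range_succ, List.map_append, List.foldl_append, ih (by omega)]
      have hlt : 2 * m < cs.length := by omega
      have hlt1 : 2 * m + 1 < cs.length := by omega
      have hg1 : PySem.List.pyGet? cs (0 + 2 * (m : Int)) = some cs[2 * m] := by
        have : (0 + 2 * (m : Int)) = ((2 * m : Nat) : Int) := by push_cast; ring
        rw [this, PySem.List.pyGet?_natCast, List.getElem?_eq_getElem hlt]
      have hg2 : PySem.List.pyGet? cs (0 + 2 * (m : Int) + 1) = some cs[2 * m + 1] := by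
        have : (0 + 2 * (m : Int) + 1) = ((2 * m + 1 : Nat) : Int) := by push_cast; ring
        rw [this, PySem.List.pyGet?_natCast, List.getElem?_eq_getElem hlt1]
      obtain ⟨e1, b1, b1'⟩ := hexVal?_of_isHex (hhex cs[2 * m] (List.getElem_mem hlt))
      obtain ⟨e2, b2, b2'⟩ := hexVal?_of_isHex (hhex cs[2 * m + 1] (List.getElem_mem hlt1))
      simp only [List.map_cons, List.map_nil, List.foldl_cons, List.foldl_nil, Option.bind_some, hg1, hg2, e1, e2]
      rw [ET7M_eq_sbyte (by omega) (by omega)]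
      have htake : cs.take (2 * (m + 1)) = cs.take (2 * m) ++ [cs[2 * m], cs[2 * m + 1]] := by
        have h1 : 2 * (m + 1) = (2 * m + 1) + 1 := by ring
        rw [h1, List.take_add_one, List.take_add_one, List.getElem?_eq_getElem hlt,
          List.getElem?_eq_getElem hlt1]
        simp only [Option.toList_some, List.append_assoc, List.cons_append, List.nil_append]
      rw [htake, decode_append (by simp; omega)]
      simp [decode]

-- ===== VERDICT (by name: the statement is the Claim_ definition above) =====
theorem bTv6p_spec : Claim_equal_bTv6p := by
  intro bbs3x _ hpre
  unfold Spec_bTv6p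
  cases bbs3x with
  | none => rfl
  | some s =>
      simp only [Pre_bTv6p, Option.all_some, Bool.and_eq_true, List.all_eq_true,
        decide_eq_true_eq] at hpre
      obtain ⟨⟨hne, hev⟩, hhex⟩ := hpre
      have hhex' : ∀ c ∈ s.toList, IsHex c := fun c hc => hhex c hc
      obtain ⟨m, hm⟩ : ∃ m, s.toList.length = 2 * m := ⟨s.toList.length / 2, by omega⟩
      simp only [bTv6p, bTv6p_alt, if_neg hne]
      rw [bTv6pGo_eq_decode hhex' hev]
      have hfold := A_fold (cs := s.toList) hhex' m (by omega)
      have hcast : ((s.toList.length : Int)) = 2 * (m : Int) := by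
        rw [hm]; push_cast; ring
      rw [hcast, pyRange_two m, hfold]
      rw [List.take_of_length_le (by omega)]
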